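-- pv_equiv track=rewrite | github.com/ShortyMcGee/EMA-Portfolio-Submission | Blob/new_main.py | rec_blob
-- ===== SOURCE A (Python) =====
-- def sewer_check(city):
--     storage = []
--     for num in range(len(city)):
--         for val in range(len(city[0])):
--             if city[num][val] == '@':
--                 point = [num,val]
--                 storage.append(point)
--     return storage
--
-- def rec_blob(city,row,clmn,eaten):
--     row_bound = len(city)
--     clmn_bound = len(city[0])
--     #These are my base cases
--     if row < 0 or row >= row_bound or clmn < 0 or clmn >= clmn_bound:
--         return eaten
--     position = city[row][clmn]
--     if position == 'B' or position == '#':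
--         return eaten
--     if position == 'P':
--         eaten+=1
--     city[row][clmn] = 'B'
--     #look up
--     eaten = rec_blob(city,row-1,clmn,eaten)
--     #look right
--     eaten = rec_blob(city,row,clmn+1,eaten)
--     #look down
--     eaten = rec_blob(city,row+1,clmn,eaten)
--     #look left
--     eaten = rec_blob(city,row,clmn-1,eaten)
--     if position == '@':
--         points = sewer_check(city)
--         for value in points:
--             eaten = rec_blob(city,value[0],value[1],eaten)
--         city[row][clmn] = '@'
--     return eaten
-- ===== SOURCE B (Python) =====
-- # Iterative re-implementation: explicit frame stack (visit/sewer/restore frames)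
-- # instead of recursion; same return value and the same in-place mutation of city.
-- def rec_blob(city, row, clmn, eaten):
--     row_bound = len(city)
--     clmn_bound = len(city[0])
--     stack = [('visit', row, clmn)]
--     while stack:
--         tag, r, c = stack.pop()
--         if tag == 'restore':
--             city[r][c] = '@'
--             continue
--         if tag == 'sewer':
--             pts = [(i, j) for i in range(row_bound) for j in range(clmn_bound)
--                    if city[i][j] == '@']
--             for i, j in reversed(pts):
--                 stack.append(('visit', i, j))
--             continue
--         if r < 0 or r >= row_bound or c < 0 or c >= clmn_bound:
--             continue
--         pos = city[r][c]
--         if pos == 'B' or pos == '#':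
--             continue
--         if pos == 'P':
--             eaten += 1
--         city[r][c] = 'B'
--         if pos == '@':
--             stack.append(('restore', r, c))
--             stack.append(('sewer', 0, 0))
--         stack.append(('visit', r, c - 1))
--         stack.append(('visit', r + 1, c))
--         stack.append(('visit', r, c + 1))
--         stack.append(('visit', r - 1, c))
--     return eaten
-- ===== Notes on version B (the rewrite author's own statement) =====
-- stated objective: alternative
-- what changed: Replaces A's self-recursive flood fill (up to a recursive sewer loop) by an iterative explicit frame-stack machine with visit/sewer/restore frames that performs the identical marking, counting and '@'-restoration steps without Python recursion.
-- outside the precondition, e.g. on rec_blob([['P', '#'], ['#']], 0, 0, 0): A returns 1, B returns 1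
import Mathlib
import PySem

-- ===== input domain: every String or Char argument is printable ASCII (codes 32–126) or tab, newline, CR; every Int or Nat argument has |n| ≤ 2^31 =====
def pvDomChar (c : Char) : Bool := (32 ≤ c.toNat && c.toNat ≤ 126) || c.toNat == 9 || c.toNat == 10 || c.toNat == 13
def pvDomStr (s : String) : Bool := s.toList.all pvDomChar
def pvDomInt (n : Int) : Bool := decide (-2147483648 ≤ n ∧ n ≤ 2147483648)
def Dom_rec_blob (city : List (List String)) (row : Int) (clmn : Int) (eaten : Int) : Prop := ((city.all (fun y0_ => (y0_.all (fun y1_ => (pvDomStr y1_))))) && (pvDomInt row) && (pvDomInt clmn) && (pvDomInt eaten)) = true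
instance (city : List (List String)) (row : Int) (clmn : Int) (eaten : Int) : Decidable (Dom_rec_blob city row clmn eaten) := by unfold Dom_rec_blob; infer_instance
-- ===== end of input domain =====

-- B replaces A's recursive flood fill by an iterative explicit frame-stack machine
-- (visit/sewer/restore frames) that performs the identical marking, counting and
-- '@'-restoration steps; in Python both mutate `city` identically, and the
-- theorems below are about the RETURN value.

-- ===== PORT A =====
def cellN (city : List (List String)) (i j : Nat) : String := (city.getD i []).getD j ""
def cellGet (city : List (List String)) (r c : Int) : String := cellN city r.toNat c.toNat
def setCell (city : List (List String)) (r c : Int) (v : String) : List (List String) :=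
  city.set r.toNat ((city.getD r.toNat []).set c.toNat v)
def sewer_check (city : List (List String)) : List (Int × Int) :=
  (List.range city.length).foldl (fun storage num =>
    (List.range (city.headD []).length).foldl (fun storage val =>
      if cellN city num val = "@" then storage ++ [(Int.ofNat num, Int.ofNat val)] else storage)
      storage) []
-- the sewer for-loop of A: rec_blob sequentially over the collected points
def sewRun (f : List (List String) → Int → Int → Int → Option (List (List String) × Int))
    (pts : List (Int × Int)) (st : Option (List (List String) × Int)) :
    Option (List (List String) × Int) :=
  pts.foldl (fun acc p => acc.bind fun s => f s.1 p.1 p.2 s.2) st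
-- fueled transliteration of A's recursion; the fuel only makes the function
-- total, and rec_blob below supplies provably sufficient fuel
def recA : Nat → List (List String) → Int → Int → Int → Option (List (List String) × Int)
  | 0, _, _, _, _ => none
  | fuel + 1, city, row, clmn, eaten =>
    let row_bound : Int := city.length
    let clmn_bound : Int := (city.headD []).length
    if row < 0 ∨ row_bound ≤ row ∨ clmn < 0 ∨ clmn_bound ≤ clmn then some (city, eaten)
    else
      let position := cellGet city row clmn
      if position = "B" ∨ position = "#" then some (city, eaten)
      else
        let eaten1 := if position = "P" then eaten + 1 else eaten
        let city1 := setCell city row clmn "B"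
        (recA fuel city1 (row - 1) clmn eaten1).bind fun s2 =>
        (recA fuel s2.1 row (clmn + 1) s2.2).bind fun s3 =>
        (recA fuel s3.1 (row + 1) clmn s3.2).bind fun s4 =>
        (recA fuel s4.1 row (clmn - 1) s4.2).bind fun s5 =>
        if position = "@" then
          (sewRun (recA fuel) (sewer_check s5.1) (some s5)).map fun s6 =>
            (setCell s6.1 row clmn "@", s6.2)
        else some s5
def rec_blob (city : List (List String)) (row : Int) (clmn : Int) (eaten : Int) : Int :=
  match recA (city.length * (city.headD []).length + 2) city row clmn eaten with
  | some s => s.2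
  | none => eaten
-- ===== PORT B =====
inductive BFrame
  | visit : Int → Int → BFrame
  | sewer : BFrame
  | restore : Int → Int → BFrame
deriving DecidableEq, Repr
-- B's list comprehension over the current grid
def sewerB (city : List (List String)) (rb cb : Nat) : List (Int × Int) :=
  (List.range rb).flatMap fun i =>
    ((List.range cb).filter fun j => cellN city i j = "@").map fun j => (Int.ofNat i, Int.ofNat j)
-- B's while-loop over the explicit frame stack (head = top of stack); the fuel
-- only makes it total, rec_blob_alt supplies provably sufficient fuel
def stackB : Nat → List BFrame → List (List String) → Int → Int → Int → Option Int
  | 0, _, _, _, _, _ => none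
  | _ + 1, [], _, eaten, _, _ => some eaten
  | f + 1, BFrame.restore r c :: rest, city, eaten, rb, cb =>
      stackB f rest (setCell city r c "@") eaten rb cb
  | f + 1, BFrame.sewer :: rest, city, eaten, rb, cb =>
      stackB f (((sewerB city rb.toNat cb.toNat).map fun p => BFrame.visit p.1 p.2) ++ rest)
        city eaten rb cb
  | f + 1, BFrame.visit r c :: rest, city, eaten, rb, cb =>
      if r < 0 ∨ rb ≤ r ∨ c < 0 ∨ cb ≤ c then stackB f rest city eaten rb cb
      else
        let pos := cellGet city r c
        if pos = "B" ∨ pos = "#" then stackB f rest city eaten rb cb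
        else
          stackB f
            (BFrame.visit (r - 1) c :: BFrame.visit r (c + 1) :: BFrame.visit (r + 1) c ::
              BFrame.visit r (c - 1) ::
              ((if pos = "@" then [BFrame.sewer, BFrame.restore r c] else []) ++ rest))
            (setCell city r c "B") (if pos = "P" then eaten + 1 else eaten) rb cb
def rec_blob_alt (city : List (List String)) (row : Int) (clmn : Int) (eaten : Int) : Int :=
  let n := city.length * (city.headD []).length
  match stackB ((n + 6) ^ (n + 2) + 1) [BFrame.visit row clmn] city eaten
      (city.length : Int) ((city.headD []).length : Int) with
  | some e => e
  | none => eaten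
-- ===== PRECONDITION & SPEC =====
-- Pre_ excludes the empty city (A raises IndexError at city[0]) and ragged grids
-- (some row shorter than row 0) unless the start is out of bounds or on a blocked
-- cell, because the flood may index past a short row and raise IndexError; this
-- also excludes some ragged grids whose short rows the flood never reaches.
def Pre_rec_blob (city : List (List String)) (row : Int) (clmn : Int) (eaten : Int) : Prop :=
  city ≠ [] ∧
  ((∀ rw ∈ city, (city.headD []).length ≤ rw.length)
   ∨ (row < 0 ∨ (city.length : Int) ≤ row ∨ clmn < 0 ∨ ((city.headD []).length : Int) ≤ clmn)
   ∨ (0 ≤ row ∧ row < (city.length : Int) ∧ 0 ≤ clmn ∧ clmn < ((city.headD []).length : Int)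
      ∧ clmn.toNat < (city.getD row.toNat []).length
      ∧ (cellN city row.toNat clmn.toNat = "B" ∨ cellN city row.toNat clmn.toNat = "#")))
instance (city : List (List String)) (row : Int) (clmn : Int) (eaten : Int) : Decidable (Pre_rec_blob city row clmn eaten) := by unfold Pre_rec_blob; infer_instance

def pvWitness_rec_blob : List (List String) × Int × Int × Int := ([["P", "@"], [".", "#"]], 0, 0, 0)

def Spec_rec_blob (city : List (List String)) (row : Int) (clmn : Int) (eaten : Int) (out : Int) : Prop := out = rec_blob_alt city row clmn eaten
instance (city : List (List String)) (row : Int) (clmn : Int) (eaten : Int) (out : Int) : Decidable (Spec_rec_blob city row clmn eaten out) := by unfold Spec_rec_blob; infer_instance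

-- ===== CLAIM (what is proved, stated in full; the proofs are below) =====
def Claim_equal_rec_blob : Prop := ∀ (city : List (List String)) (row : Int) (clmn : Int) (eaten : Int), Dom_rec_blob city row clmn eaten → Pre_rec_blob city row clmn eaten → Spec_rec_blob city row clmn eaten (rec_blob city row clmn eaten)

-- ===== LEMMAS AND PROOFS =====

-- proof-side notions: Rle a b says every cell of a is b's cell or already "B";
-- Scnt counts the non-"B" cells in view; shapeOK says no row is shorter than row 0
def Rle (a b : List (List String)) : Prop :=
  ∀ i j, cellN a i j = cellN b i j ∨ cellN a i j = "B"
def Scnt (rbN cbN : Nat) (city : List (List String)) : Nat :=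
  ∑ p ∈ Finset.range rbN ×ˢ Finset.range cbN, (if cellN city p.1 p.2 = "B" then 0 else 1)
def shapeOK (city : List (List String)) : Prop :=
  ∀ rw ∈ city, (city.headD []).length ≤ rw.length

theorem getD_set_ne {α : Type} (l : List α) (i j : Nat) (a : α) (d : α) (h : j ≠ i) :
    (l.set i a).getD j d = l.getD j d := by
  simp [List.getD, List.getElem?_set, Ne.symm h]

theorem getD_set_self {α : Type} (l : List α) (i : Nat) (a : α) (d : α) (h : i < l.length) :
    (l.set i a).getD i d = a := by
  simp [List.getD, List.getElem?_set, h]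

theorem getD_set_oob {α : Type} (l : List α) (i : Nat) (a : α) (d : α) (h : ¬ i < l.length) :
    (l.set i a).getD i d = l.getD i d := by
  simp [List.getD, List.getElem?_set, h, List.getElem?_eq_none (by omega : l.length ≤ i)]

theorem rowsLen_setCell (city : List (List String)) (r c : Int) (v : String) :
    (setCell city r c v).map List.length = city.map List.length := by
  unfold setCell
  apply List.ext_getElem?
  intro i
  simp only [List.getElem?_map, List.getElem?_set]
  by_cases hi : r.toNat = i
  · subst hi
    by_cases h : r.toNat < city.length
    · simp [h, List.getD, List.getElem?_eq_getElem h]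
    · simp [h]
  · simp [hi]

theorem cellN_setCell_ne (city : List (List String)) (r c : Int) (v : String) (i j : Nat)
    (h : i ≠ r.toNat ∨ j ≠ c.toNat) : cellN (setCell city r c v) i j = cellN city i j := by
  rcases h with h | h
  · unfold cellN setCell
    rw [getD_set_ne _ _ _ _ _ h]
  · by_cases hi : i = r.toNat
    · rw [hi]
      unfold cellN setCell
      by_cases hlt : r.toNat < city.length
      · rw [getD_set_self _ _ _ _ hlt, getD_set_ne _ _ _ _ _ h]
      · rw [getD_set_oob _ _ _ _ hlt]
    · unfold cellN setCell
      rw [getD_set_ne _ _ _ _ _ hi]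

theorem cellN_setCell_self (city : List (List String)) (r c : Int) (v : String)
    (hr : r.toNat < city.length) (hc : c.toNat < (city.getD r.toNat []).length) :
    cellN (setCell city r c v) r.toNat c.toNat = v := by
  unfold cellN setCell
  rw [getD_set_self _ _ _ _ hr, getD_set_self _ _ _ _ hc]

theorem cellN_setCell_eq_or (city : List (List String)) (r c : Int) (v : String) (i j : Nat) :
    cellN (setCell city r c v) i j = cellN city i j ∨
      cellN (setCell city r c v) i j = v := by
  by_cases h : i = r.toNat ∧ j = c.toNat
  · obtain ⟨hi, hj⟩ := h
    rw [hi, hj]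
    by_cases hr : r.toNat < city.length
    · by_cases hc : c.toNat < (city.getD r.toNat []).length
      · right; exact cellN_setCell_self city r c v hr hc
      · left; unfold cellN setCell
        rw [getD_set_self _ _ _ _ hr, getD_set_oob _ _ _ _ hc]
    · left; unfold cellN setCell; rw [getD_set_oob _ _ _ _ hr]
  · left
    apply cellN_setCell_ne
    tauto

theorem Rle_refl (a : List (List String)) : Rle a a := fun _ _ => Or.inl rfl

theorem Rle_trans {a b c : List (List String)} (h1 : Rle a b) (h2 : Rle b c) : Rle a c := by
  intro i j
  rcases h1 i j with h | h
  · rcases h2 i j with h' | h'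
    · exact Or.inl (h.trans h')
    · exact Or.inr (h.trans h')
  · exact Or.inr h

theorem Rle_setB (city : List (List String)) (r c : Int) : Rle (setCell city r c "B") city := by
  intro i j
  rcases cellN_setCell_eq_or city r c "B" i j with h | h
  · exact Or.inl h
  · exact Or.inr h

theorem Rle_set_restore {a b : List (List String)} (r c : Int) (h : Rle a b)
    (hv : cellN b r.toNat c.toNat = "@") : Rle (setCell a r c "@") b := by
  intro i j
  by_cases hij : i = r.toNat ∧ j = c.toNat
  · obtain ⟨hi, hj⟩ := hij
    rw [hi, hj]
    rcases cellN_setCell_eq_or a r c "@" r.toNat c.toNat with h' | h'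
    · rw [h']; exact h _ _
    · exact Or.inl (h'.trans hv.symm)
  · rw [cellN_setCell_ne a r c "@" i j (by tauto)]; exact h i j

theorem sewRun_none (f : List (List String) → Int → Int → Int → Option (List (List String) × Int))
    (pts : List (Int × Int)) : sewRun f pts none = none := by
  induction pts with
  | nil => rfl
  | cons p ps ih => simpa [sewRun] using ih

theorem sewRun_cons (f : List (List String) → Int → Int → Int → Option (List (List String) × Int))
    (p : Int × Int) (ps : List (Int × Int)) (st : List (List String) × Int) :
    sewRun f (p :: ps) (some st) = sewRun f ps (f st.1 p.1 p.2 st.2) := by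
  simp [sewRun]

theorem sewRun_pres
    (f : List (List String) → Int → Int → Int → Option (List (List String) × Int))
    (Hf : ∀ city r c e s', f city r c e = some s' →
      s'.1.map List.length = city.map List.length ∧ Rle s'.1 city) :
    ∀ (pts : List (Int × Int)) (st s' : List (List String) × Int),
      sewRun f pts (some st) = some s' →
      s'.1.map List.length = st.1.map List.length ∧ Rle s'.1 st.1 := by
  intro pts
  induction pts with
  | nil => intro st s' h; cases h; exact ⟨rfl, Rle_refl _⟩
  | cons p ps ih =>
    intro st s' h
    rw [sewRun_cons] at h
    cases hf : f st.1 p.1 p.2 st.2 with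
    | none => rw [hf, sewRun_none] at h; cases h
    | some st1 =>
      rw [hf] at h
      obtain ⟨h1, h2⟩ := ih st1 s' h
      obtain ⟨h3, h4⟩ := Hf _ _ _ _ _ hf
      exact ⟨h1.trans h3, Rle_trans h2 h4⟩

theorem recA_pres : ∀ (fuel : Nat) (city : List (List String)) (r c e : Int)
    (s' : List (List String) × Int), recA fuel city r c e = some s' →
    s'.1.map List.length = city.map List.length ∧ Rle s'.1 city := by
  intro fuel
  induction fuel with
  | zero => intro city r c e s' h; cases h
  | succ fuel ih =>
    intro city r c e s' h
    by_cases hg1 : (r < 0 ∨ (city.length : Int) ≤ r ∨ c < 0 ∨ ((city.headD []).length : Int) ≤ c)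
    · simp only [recA, if_pos hg1] at h
      cases h; exact ⟨rfl, Rle_refl _⟩
    · by_cases hg2 : (cellGet city r c = "B" ∨ cellGet city r c = "#")
      · simp only [recA, if_neg hg1, if_pos hg2] at h
        cases h; exact ⟨rfl, Rle_refl _⟩
      · simp only [recA, if_neg hg1, if_neg hg2] at h
        rw [Option.bind_eq_some_iff] at h
        obtain ⟨s2, hs2, h⟩ := h
        rw [Option.bind_eq_some_iff] at h
        obtain ⟨s3, hs3, h⟩ := h
        rw [Option.bind_eq_some_iff] at h
        obtain ⟨s4, hs4, h⟩ := h
        rw [Option.bind_eq_some_iff] at h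
        obtain ⟨s5, hs5, h⟩ := h
        obtain ⟨l2, R2⟩ := ih _ _ _ _ _ hs2
        obtain ⟨l3, R3⟩ := ih _ _ _ _ _ hs3
        obtain ⟨l4, R4⟩ := ih _ _ _ _ _ hs4
        obtain ⟨l5, R5⟩ := ih _ _ _ _ _ hs5
        have lB := rowsLen_setCell city r c "B"
        have RB := Rle_setB city r c
        have l15 : s5.1.map List.length = city.map List.length :=
          (((l5.trans l4).trans l3).trans l2).trans lB
        have R15 : Rle s5.1 city :=
          Rle_trans (Rle_trans (Rle_trans (Rle_trans R5 R4) R3) R2) RB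
        by_cases h3 : cellGet city r c = "@"
        · rw [if_pos h3, Option.map_eq_some_iff] at h
          obtain ⟨s6, hs6, rfl⟩ := h
          obtain ⟨l6, R6⟩ := sewRun_pres (recA fuel) (fun a b c d e hf => ih a b c d e hf) _ _ _ hs6
          constructor
          · exact ((rowsLen_setCell s6.1 r c "@").trans l6).trans l15
          · exact Rle_set_restore r c (Rle_trans R6 R15) h3
        · rw [if_neg h3] at h
          cases h
          exact ⟨l15, R15⟩

theorem Scnt_le_card (rbN cbN : Nat) (city : List (List String)) :
    Scnt rbN cbN city ≤ rbN * cbN := by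
  calc Scnt rbN cbN city ≤ ∑ _p ∈ Finset.range rbN ×ˢ Finset.range cbN, 1 :=
        Finset.sum_le_sum (fun p _ => by split <;> omega)
    _ = rbN * cbN := by simp [Finset.card_product]

theorem Scnt_mono (rbN cbN : Nat) {a b : List (List String)} (h : Rle a b) :
    Scnt rbN cbN a ≤ Scnt rbN cbN b := by
  apply Finset.sum_le_sum
  intro p _
  rcases h p.1 p.2 with h' | h'
  · rw [h']
  · simp [h']

theorem Scnt_pos (rbN cbN : Nat) (city : List (List String)) (r c : Int)
    (hr : r.toNat < rbN) (hc : c.toNat < cbN) (hne : cellN city r.toNat c.toNat ≠ "B") :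
    1 ≤ Scnt rbN cbN city := by
  have hmem : (r.toNat, c.toNat) ∈ Finset.range rbN ×ˢ Finset.range cbN := by
    simp [Finset.mem_product, hr, hc]
  have h1 := Finset.single_le_sum (f := fun p : Nat × Nat =>
      if cellN city p.1 p.2 = "B" then (0 : Nat) else 1) (fun p _ => by positivity) hmem
  simp only [hne, if_false] at h1
  simpa [Scnt] using h1

theorem Scnt_set_lt (rbN cbN : Nat) (city : List (List String)) (r c : Int)
    (hr : r.toNat < rbN) (hc : c.toNat < cbN) (hne : cellN city r.toNat c.toNat ≠ "B")
    (hr' : r.toNat < city.length) (hc' : c.toNat < (city.getD r.toNat []).length) :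
    Scnt rbN cbN (setCell city r c "B") + 1 ≤ Scnt rbN cbN city := by
  have hmem : (r.toNat, c.toNat) ∈ Finset.range rbN ×ˢ Finset.range cbN := by
    simp [Finset.mem_product, hr, hc]
  have hA := (Finset.add_sum_erase (Finset.range rbN ×ˢ Finset.range cbN)
    (fun p => if cellN city p.1 p.2 = "B" then 0 else 1) hmem).symm
  have hB := (Finset.add_sum_erase (Finset.range rbN ×ˢ Finset.range cbN)
    (fun p => if cellN (setCell city r c "B") p.1 p.2 = "B" then 0 else 1) hmem).symm
  have hrest : ∑ p ∈ (Finset.range rbN ×ˢ Finset.range cbN).erase (r.toNat, c.toNat),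
      (if cellN (setCell city r c "B") p.1 p.2 = "B" then 0 else 1)
      = ∑ p ∈ (Finset.range rbN ×ˢ Finset.range cbN).erase (r.toNat, c.toNat),
      (if cellN city p.1 p.2 = "B" then 0 else 1) := by
    apply Finset.sum_congr rfl
    intro p hp
    have hpne : p ≠ (r.toNat, c.toNat) := (Finset.mem_erase.mp hp).1
    have : p.1 ≠ r.toNat ∨ p.2 ≠ c.toNat := by
      by_contra hcon
      push_neg at hcon
      exact hpne (Prod.ext hcon.1 hcon.2)
    rw [cellN_setCell_ne city r c "B" p.1 p.2 this]
  have hset : cellN (setCell city r c "B") r.toNat c.toNat = "B" :=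
    cellN_setCell_self city r c "B" hr' hc'
  unfold Scnt
  rw [hA, hB, hrest, hset]
  simp [hne]

theorem recA_succ (fuel : Nat) (city : List (List String)) (row clmn eaten : Int) :
    recA (fuel + 1) city row clmn eaten =
      if row < 0 ∨ (city.length : Int) ≤ row ∨ clmn < 0 ∨ ((city.headD []).length : Int) ≤ clmn
      then some (city, eaten)
      else if cellGet city row clmn = "B" ∨ cellGet city row clmn = "#" then some (city, eaten)
      else
        (recA fuel (setCell city row clmn "B") (row - 1) clmn
            (if cellGet city row clmn = "P" then eaten + 1 else eaten)).bind fun s2 =>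
        (recA fuel s2.1 row (clmn + 1) s2.2).bind fun s3 =>
        (recA fuel s3.1 (row + 1) clmn s3.2).bind fun s4 =>
        (recA fuel s4.1 row (clmn - 1) s4.2).bind fun s5 =>
        if cellGet city row clmn = "@" then
          (sewRun (recA fuel) (sewer_check s5.1) (some s5)).map fun s6 =>
            (setCell s6.1 row clmn "@", s6.2)
        else some s5 := by
  simp only [recA]

theorem length_of_rowsLen {a b : List (List String)}
    (h : a.map List.length = b.map List.length) : a.length = b.length := by
  have := congrArg List.length h
  simpa using this

theorem headLen_of_rowsLen {a b : List (List String)}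
    (h : a.map List.length = b.map List.length) :
    (a.headD []).length = (b.headD []).length := by
  cases a with
  | nil => cases b with
    | nil => rfl
    | cons x xs => simp at h
  | cons x xs => cases b with
    | nil => simp at h
    | cons y ys => simp at h; simpa using h.1

theorem shapeOK_of_rowsLen {a b : List (List String)}
    (h : a.map List.length = b.map List.length) (hb : shapeOK b) : shapeOK a := by
  intro rw hrw
  have h1 : rw.length ∈ a.map List.length := List.mem_map_of_mem hrw
  rw [h] at h1
  obtain ⟨rw', hrw', hlen⟩ := List.mem_map.mp h1
  rw [headLen_of_rowsLen h, ← hlen]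
  exact hb rw' hrw'

theorem getD_mem (city : List (List String)) (i : Nat) (h : i < city.length) :
    city.getD i [] ∈ city := by
  rw [List.getD, List.getElem?_eq_getElem h]
  exact List.getElem_mem h

theorem sewRun_total (fuel : Nat)
    (Hrec : ∀ (city : List (List String)) (r c e : Int), shapeOK city →
      Scnt city.length (city.headD []).length city + 1 ≤ fuel →
      ∃ s', recA fuel city r c e = some s') :
    ∀ (pts : List (Int × Int)) (st : List (List String) × Int), shapeOK st.1 →
      Scnt st.1.length (st.1.headD []).length st.1 + 1 ≤ fuel →
      ∃ s', sewRun (recA fuel) pts (some st) = some s' := by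
  intro pts
  induction pts with
  | nil => intro st _ _; exact ⟨st, rfl⟩
  | cons p ps ih =>
    intro st hsh hcnt
    obtain ⟨st1, hst1⟩ := Hrec st.1 p.1 p.2 st.2 hsh hcnt
    have hstep : sewRun (recA fuel) (p :: ps) (some st) = sewRun (recA fuel) ps (some st1) := by
      simp [sewRun, hst1]
    rw [hstep]
    obtain ⟨hrl, hR⟩ := recA_pres fuel st.1 p.1 p.2 st.2 st1 hst1
    have hlen := length_of_rowsLen hrl
    have hhl := headLen_of_rowsLen hrl
    apply ih
    · exact shapeOK_of_rowsLen hrl hsh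
    · rw [hlen, hhl]
      have := Scnt_mono st.1.length (st.1.headD []).length hR
      omega

theorem recA_total : ∀ (m : Nat) (city : List (List String)) (r c e : Int),
    shapeOK city → Scnt city.length (city.headD []).length city ≤ m →
    ∃ s', recA (m + 1) city r c e = some s' := by
  intro m
  induction m using Nat.strong_induction_on with
  | _ m IH =>
  intro city r c e hsh hcnt
  by_cases hg1 : (r < 0 ∨ (city.length : Int) ≤ r ∨ c < 0 ∨ ((city.headD []).length : Int) ≤ c)
  · exact ⟨(city, e), by simp only [recA, if_pos hg1]⟩
  · by_cases hg2 : (cellGet city r c = "B" ∨ cellGet city r c = "#")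
    · exact ⟨(city, e), by simp only [recA, if_neg hg1, if_pos hg2]⟩
    · -- in-bounds, unblocked
      have hgo := hg1
      push_neg at hg1
      obtain ⟨hr0, hrlt, hc0, hclt⟩ := hg1
      have hrN : r.toNat < city.length := by omega
      have hcN : c.toNat < (city.headD []).length := by omega
      have hne : cellN city r.toNat c.toNat ≠ "B" := fun hB => hg2 (Or.inl hB)
      have hrow : c.toNat < (city.getD r.toNat []).length :=
        lt_of_lt_of_le hcN (hsh _ (getD_mem city r.toNat hrN))
      have hdec := Scnt_set_lt city.length (city.headD []).length city r c hrN hcN hne hrN hrow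
      have hpos := Scnt_pos city.length (city.headD []).length city r c hrN hcN hne
      obtain ⟨m', rfl⟩ : ∃ m', m = m' + 1 := ⟨m - 1, by omega⟩
      -- dims of city1
      set city1 := setCell city r c "B" with hcity1
      have hrl1 := rowsLen_setCell city r c "B"
      have hsh1 : shapeOK city1 := shapeOK_of_rowsLen hrl1 hsh
      have hcnt1 : Scnt city.length (city.headD []).length city1 ≤ m' := by omega
      -- helper: full-strength recursion at fuel m'+1 for any state related to city
      have Hrec : ∀ (cc : List (List String)) (rr cc2 ee : Int), shapeOK cc →
          Scnt cc.length (cc.headD []).length cc + 1 ≤ m' + 1 →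
          ∃ s', recA (m' + 1) cc rr cc2 ee = some s' := by
        intro cc rr cc2 ee hsh' hcnt'
        exact IH m' (by omega) cc rr cc2 ee hsh' (by omega)
      have hlen1 := length_of_rowsLen hrl1
      have hhl1 := headLen_of_rowsLen hrl1
      -- step through the four neighbour calls
      obtain ⟨s2, hs2⟩ := Hrec city1 (r - 1) c (if cellGet city r c = "P" then e + 1 else e)
        hsh1 (by rw [hlen1, hhl1]; omega)
      obtain ⟨rl2, R2⟩ := recA_pres _ _ _ _ _ _ hs2
      have hd2 : s2.1.length = city.length ∧ (s2.1.headD []).length = (city.headD []).length :=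
        ⟨(length_of_rowsLen rl2).trans hlen1, (headLen_of_rowsLen rl2).trans hhl1⟩
      have hc2 : Scnt city.length (city.headD []).length s2.1 ≤ m' :=
        le_trans (Scnt_mono _ _ R2) hcnt1
      obtain ⟨s3, hs3⟩ := Hrec s2.1 r (c + 1) s2.2 (shapeOK_of_rowsLen rl2 hsh1)
        (by rw [hd2.1, hd2.2]; omega)
      obtain ⟨rl3, R3⟩ := recA_pres _ _ _ _ _ _ hs3
      have hd3 : s3.1.length = city.length ∧ (s3.1.headD []).length = (city.headD []).length :=
        ⟨(length_of_rowsLen rl3).trans hd2.1, (headLen_of_rowsLen rl3).trans hd2.2⟩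
      have hc3 : Scnt city.length (city.headD []).length s3.1 ≤ m' :=
        le_trans (Scnt_mono _ _ R3) hc2
      obtain ⟨s4, hs4⟩ := Hrec s3.1 (r + 1) c s3.2
        (shapeOK_of_rowsLen rl3 (shapeOK_of_rowsLen rl2 hsh1)) (by rw [hd3.1, hd3.2]; omega)
      obtain ⟨rl4, R4⟩ := recA_pres _ _ _ _ _ _ hs4
      have hd4 : s4.1.length = city.length ∧ (s4.1.headD []).length = (city.headD []).length :=
        ⟨(length_of_rowsLen rl4).trans hd3.1, (headLen_of_rowsLen rl4).trans hd3.2⟩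
      have hc4 : Scnt city.length (city.headD []).length s4.1 ≤ m' :=
        le_trans (Scnt_mono _ _ R4) hc3
      have hsh4 : shapeOK s4.1 :=
        shapeOK_of_rowsLen rl4 (shapeOK_of_rowsLen rl3 (shapeOK_of_rowsLen rl2 hsh1))
      obtain ⟨s5, hs5⟩ := Hrec s4.1 r (c - 1) s4.2 hsh4 (by rw [hd4.1, hd4.2]; omega)
      obtain ⟨rl5, R5⟩ := recA_pres _ _ _ _ _ _ hs5
      have hd5 : s5.1.length = city.length ∧ (s5.1.headD []).length = (city.headD []).length :=
        ⟨(length_of_rowsLen rl5).trans hd4.1, (headLen_of_rowsLen rl5).trans hd4.2⟩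
      have hc5 : Scnt city.length (city.headD []).length s5.1 ≤ m' :=
        le_trans (Scnt_mono _ _ R5) hc4
      have hsh5 : shapeOK s5.1 := shapeOK_of_rowsLen rl5 hsh4
      by_cases h3 : cellGet city r c = "@"
      · obtain ⟨s6, hs6⟩ := sewRun_total (m' + 1) Hrec (sewer_check s5.1) s5 hsh5
          (by rw [hd5.1, hd5.2]; omega)
        refine ⟨(setCell s6.1 r c "@", s6.2), ?_⟩
        rw [recA_succ, if_neg hgo, if_neg hg2, hs2, Option.bind_some, hs3, Option.bind_some,
          hs4, Option.bind_some, hs5, Option.bind_some, if_pos h3, hs6]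
        rfl
      · refine ⟨s5, ?_⟩
        rw [recA_succ, if_neg hgo, if_neg hg2, hs2, Option.bind_some, hs3, Option.bind_some,
          hs4, Option.bind_some, hs5, Option.bind_some, if_neg h3]

theorem stackB_nil (f : Nat) (city : List (List String)) (eaten : Int) (rb cb : Int) :
    stackB (f + 1) [] city eaten rb cb = some eaten := rfl

theorem stackB_restore (f : Nat) (r c : Int) (rest : List BFrame) (city : List (List String))
    (eaten rb cb : Int) : stackB (f + 1) (BFrame.restore r c :: rest) city eaten rb cb =
      stackB f rest (setCell city r c "@") eaten rb cb := rfl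

theorem stackB_sewer (f : Nat) (rest : List BFrame) (city : List (List String))
    (eaten rb cb : Int) : stackB (f + 1) (BFrame.sewer :: rest) city eaten rb cb =
      stackB f (((sewerB city rb.toNat cb.toNat).map fun p => BFrame.visit p.1 p.2) ++ rest)
        city eaten rb cb := rfl

theorem stackB_visit (f : Nat) (r c : Int) (rest : List BFrame) (city : List (List String))
    (eaten rb cb : Int) : stackB (f + 1) (BFrame.visit r c :: rest) city eaten rb cb =
      if r < 0 ∨ rb ≤ r ∨ c < 0 ∨ cb ≤ c then stackB f rest city eaten rb cb
      else if cellGet city r c = "B" ∨ cellGet city r c = "#" then stackB f rest city eaten rb cb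
      else
        stackB f
          (BFrame.visit (r - 1) c :: BFrame.visit r (c + 1) :: BFrame.visit (r + 1) c ::
            BFrame.visit r (c - 1) ::
            ((if cellGet city r c = "@" then [BFrame.sewer, BFrame.restore r c] else []) ++ rest))
          (setCell city r c "B") (if cellGet city r c = "P" then eaten + 1 else eaten) rb cb := by
  simp only [stackB]

theorem foldl_append_prop_if (city : List (List String)) (num : Nat) :
    ∀ (l : List Nat) (storage : List (Int × Int)),
      l.foldl (fun storage val =>
        if cellN city num val = "@" then storage ++ [(Int.ofNat num, Int.ofNat val)] else storage)
        storage
      = storage ++ ((l.filter fun val => cellN city num val = "@").map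
          fun val => (Int.ofNat num, Int.ofNat val)) := by
  intro l
  induction l with
  | nil => intro storage; simp
  | cons x xs ih =>
    intro storage
    rw [List.foldl_cons]
    by_cases h : cellN city num x = "@"
    · rw [if_pos h, ih, List.filter_cons_of_pos (by simpa using h), List.map_cons]
      simp
    · rw [if_neg h, ih, List.filter_cons_of_neg (by simpa using h)]

theorem sewer_eq (city : List (List String)) (rbN cbN : Nat) (hrb : city.length = rbN)
    (hcb : (city.headD []).length = cbN) : sewerB city rbN cbN = sewer_check city := by
  subst hrb hcb
  unfold sewer_check sewerB
  simp only [foldl_append_prop_if]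
  rw [PySem.List.foldl_append_eq_flatMap]
  simp

theorem len_flatMap_le {α β : Type} (g : α → List β) (cnt : Nat)
    (h : ∀ i, (g i).length ≤ cnt) : ∀ (l : List α), (l.flatMap g).length ≤ l.length * cnt := by
  intro l
  induction l with
  | nil => simp
  | cons x xs ih =>
    rw [List.flatMap_cons, List.length_append, List.length_cons, Nat.succ_mul, Nat.add_comm (xs.length * cnt) cnt]
    exact Nat.add_le_add (h x) ih

theorem sewer_len (city : List (List String)) :
    (sewer_check city).length ≤ city.length * (city.headD []).length := by
  rw [← sewer_eq city city.length (city.headD []).length rfl rfl]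
  unfold sewerB
  calc ((List.range city.length).flatMap fun i =>
        ((List.range (city.headD []).length).filter fun j => cellN city i j = "@").map
          fun j => (Int.ofNat i, Int.ofNat j)).length
      ≤ (List.range city.length).length * (city.headD []).length := by
        apply len_flatMap_le
        intro i
        rw [List.length_map]
        exact le_trans (List.length_filter_le _ _) (by simp)
    _ = city.length * (city.headD []).length := by simp

theorem stackB_mono : ∀ (f : Nat) (fr : List BFrame) (city : List (List String)) (e : Int)
    (rb cb : Int) (v : Int), stackB f fr city e rb cb = some v →
    ∀ k, stackB (f + k) fr city e rb cb = some v := by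
  intro f
  induction f with
  | zero => intro fr city e rb cb v h; cases h
  | succ f ih =>
    intro fr city e rb cb v h k
    rw [Nat.succ_add]
    cases fr with
    | nil => exact h
    | cons fr0 rest =>
      cases fr0 with
      | restore r c => rw [stackB_restore] at h ⊢; exact ih _ _ _ _ _ _ h k
      | sewer => rw [stackB_sewer] at h ⊢; exact ih _ _ _ _ _ _ h k
      | visit r c =>
        rw [stackB_visit] at h ⊢
        by_cases h1 : (r < 0 ∨ rb ≤ r ∨ c < 0 ∨ cb ≤ c)
        · rw [if_pos h1] at h ⊢; exact ih _ _ _ _ _ _ h k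
        · rw [if_neg h1] at h ⊢
          by_cases h2 : (cellGet city r c = "B" ∨ cellGet city r c = "#")
          · rw [if_pos h2] at h ⊢; exact ih _ _ _ _ _ _ h k
          · rw [if_neg h2] at h ⊢; exact ih _ _ _ _ _ _ h k

theorem sewRun_none' (f : List (List String) → Int → Int → Int → Option (List (List String) × Int))
    (pts : List (Int × Int)) : sewRun f pts none = none := by
  induction pts with
  | nil => rfl
  | cons p ps ih => simpa [sewRun] using ih

theorem sewRun_cons' (f : List (List String) → Int → Int → Int → Option (List (List String) × Int))
    (p : Int × Int) (ps : List (Int × Int)) (st : List (List String) × Int) :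
    sewRun f (p :: ps) (some st) = sewRun f ps (f st.1 p.1 p.2 st.2) := by
  simp [sewRun]

theorem simFold (d rbN cbN : Nat)
    (IH : ∀ (city : List (List String)) (r c e : Int) (s' : List (List String) × Int),
      recA d city r c e = some s' → city.length = rbN → (city.headD []).length = cbN →
      ∀ (g : Nat) (rest : List BFrame),
        ∃ f, f ≤ (rbN * cbN + 6) ^ d ∧
          stackB (f + g) (BFrame.visit r c :: rest) city e (rbN : Int) (cbN : Int)
            = stackB g rest s'.1 s'.2 (rbN : Int) (cbN : Int)) :
    ∀ (pts : List (Int × Int)) (st s6 : List (List String) × Int),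
      sewRun (recA d) pts (some st) = some s6 →
      st.1.length = rbN → (st.1.headD []).length = cbN →
      ∀ (g : Nat) (rest : List BFrame),
        ∃ f, f ≤ pts.length * (rbN * cbN + 6) ^ d ∧
          stackB (f + g) ((pts.map fun p => BFrame.visit p.1 p.2) ++ rest) st.1 st.2
              (rbN : Int) (cbN : Int)
            = stackB g rest s6.1 s6.2 (rbN : Int) (cbN : Int) := by
  intro pts
  induction pts with
  | nil =>
    intro st s6 h _ _ g rest
    cases h
    refine ⟨0, by simp, ?_⟩
    simp
  | cons p ps ih2 =>
    intro st s6 h hrb hcb g rest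
    rw [sewRun_cons'] at h
    cases hf : recA d st.1 p.1 p.2 st.2 with
    | none => rw [hf, sewRun_none'] at h; cases h
    | some st1 =>
      rw [hf] at h
      obtain ⟨rl1, _⟩ := recA_pres d st.1 p.1 p.2 st.2 st1 hf
      obtain ⟨f2, hb2, he2⟩ := ih2 st1 s6 h ((length_of_rowsLen rl1).trans hrb)
        ((headLen_of_rowsLen rl1).trans hcb) g rest
      obtain ⟨f1, hb1, he1⟩ := IH st.1 p.1 p.2 st.2 st1 hf hrb hcb (f2 + g)
        ((ps.map fun p => BFrame.visit p.1 p.2) ++ rest)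
      refine ⟨f1 + f2, ?_, ?_⟩
      · rw [List.length_cons, Nat.succ_mul]
        omega
      · rw [List.map_cons, List.cons_append]
        rw [show f1 + f2 + g = f1 + (f2 + g) from by omega]
        rw [he1]
        exact he2

theorem sim : ∀ (d : Nat) (city : List (List String)) (r c e : Int)
    (s' : List (List String) × Int),
    recA d city r c e = some s' →
    ∀ (rbN cbN : Nat), city.length = rbN → (city.headD []).length = cbN →
    ∀ (g : Nat) (rest : List BFrame),
    ∃ f, f ≤ (rbN * cbN + 6) ^ d ∧
      stackB (f + g) (BFrame.visit r c :: rest) city e (rbN : Int) (cbN : Int)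
        = stackB g rest s'.1 s'.2 (rbN : Int) (cbN : Int) := by
  intro d
  induction d with
  | zero => intro city r c e s' h; cases h
  | succ d ihd =>
    intro city r c e s' h rbN cbN hrb hcb g rest
    rw [recA_succ, hrb, hcb] at h
    by_cases hg1 : (r < 0 ∨ (rbN : Int) ≤ r ∨ c < 0 ∨ (cbN : Int) ≤ c)
    · rw [if_pos hg1] at h
      cases h
      refine ⟨1, Nat.one_le_pow _ _ (by omega), ?_⟩
      rw [show 1 + g = g + 1 from by omega, stackB_visit, if_pos hg1]
    · rw [if_neg hg1] at h
      by_cases hg2 : (cellGet city r c = "B" ∨ cellGet city r c = "#")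
      · rw [if_pos hg2] at h
        cases h
        refine ⟨1, Nat.one_le_pow _ _ (by omega), ?_⟩
        rw [show 1 + g = g + 1 from by omega, stackB_visit, if_neg hg1, if_pos hg2]
      · rw [if_neg hg2, Option.bind_eq_some_iff] at h
        obtain ⟨s2, hs2, h⟩ := h
        rw [Option.bind_eq_some_iff] at h
        obtain ⟨s3, hs3, h⟩ := h
        rw [Option.bind_eq_some_iff] at h
        obtain ⟨s4, hs4, h⟩ := h
        rw [Option.bind_eq_some_iff] at h
        obtain ⟨s5, hs5, h⟩ := h
        -- d ≥ 1
        have hd1 : 1 ≤ d := by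
          cases d with
          | zero => cases hs2
          | succ d' => omega
        have hx1 : 1 ≤ (rbN * cbN + 6) ^ d := Nat.one_le_pow _ _ (by omega)
        have hx6 : 6 ≤ (rbN * cbN + 6) ^ d := by
          have h1 : (rbN * cbN + 6) ^ 1 ≤ (rbN * cbN + 6) ^ d :=
            Nat.pow_le_pow_right (by omega) hd1
          rw [pow_one] at h1
          omega
        -- dimensions along the chain
        have rlB := rowsLen_setCell city r c "B"
        have d1a : (setCell city r c "B").length = rbN := (length_of_rowsLen rlB).trans hrb
        have d1b : ((setCell city r c "B").headD []).length = cbN :=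
          (headLen_of_rowsLen rlB).trans hcb
        obtain ⟨rl2, _⟩ := recA_pres _ _ _ _ _ _ hs2
        have d2a : s2.1.length = rbN := (length_of_rowsLen rl2).trans d1a
        have d2b : (s2.1.headD []).length = cbN := (headLen_of_rowsLen rl2).trans d1b
        obtain ⟨rl3, _⟩ := recA_pres _ _ _ _ _ _ hs3
        have d3a : s3.1.length = rbN := (length_of_rowsLen rl3).trans d2a
        have d3b : (s3.1.headD []).length = cbN := (headLen_of_rowsLen rl3).trans d2b
        obtain ⟨rl4, _⟩ := recA_pres _ _ _ _ _ _ hs4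
        have d4a : s4.1.length = rbN := (length_of_rowsLen rl4).trans d3a
        have d4b : (s4.1.headD []).length = cbN := (headLen_of_rowsLen rl4).trans d3b
        obtain ⟨rl5, _⟩ := recA_pres _ _ _ _ _ _ hs5
        have d5a : s5.1.length = rbN := (length_of_rowsLen rl5).trans d4a
        have d5b : (s5.1.headD []).length = cbN := (headLen_of_rowsLen rl5).trans d4b
        by_cases h3 : cellGet city r c = "@"
        · rw [if_pos h3, Option.map_eq_some_iff] at h
          obtain ⟨s6, hs6, rfl⟩ := h
          -- fold simulation
          obtain ⟨fS, hbS, heS⟩ := simFold d rbN cbN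
            (fun cc rr cc2 ee ss hrec ha hb => ihd cc rr cc2 ee ss hrec rbN cbN ha hb)
            (sewer_check s5.1) s5 s6 hs6 d5a d5b (1 + g) (BFrame.restore r c :: rest)
          obtain ⟨f4, hb4, he4⟩ := ihd _ _ _ _ _ hs5 rbN cbN d4a d4b
            (1 + (fS + (1 + g))) (BFrame.sewer :: BFrame.restore r c :: rest)
          obtain ⟨f3, hb3, he3⟩ := ihd _ _ _ _ _ hs4 rbN cbN d3a d3b
            (f4 + (1 + (fS + (1 + g))))
            (BFrame.visit r (c - 1) :: BFrame.sewer :: BFrame.restore r c :: rest)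
          obtain ⟨f2, hb2, he2⟩ := ihd _ _ _ _ _ hs3 rbN cbN d2a d2b
            (f3 + (f4 + (1 + (fS + (1 + g)))))
            (BFrame.visit (r + 1) c :: BFrame.visit r (c - 1) :: BFrame.sewer ::
              BFrame.restore r c :: rest)
          obtain ⟨f1, hb1, he1⟩ := ihd _ _ _ _ _ hs2 rbN cbN d1a d1b
            (f2 + (f3 + (f4 + (1 + (fS + (1 + g))))))
            (BFrame.visit r (c + 1) :: BFrame.visit (r + 1) c :: BFrame.visit r (c - 1) ::
              BFrame.sewer :: BFrame.restore r c :: rest)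
          refine ⟨1 + (f1 + (f2 + (f3 + (f4 + (1 + (fS + 1)))))), ?_, ?_⟩
          · -- fuel bound
            have hL : (sewer_check s5.1).length ≤ rbN * cbN := by
              have := sewer_len s5.1
              rw [d5a, d5b] at this
              exact this
            have hLS : (sewer_check s5.1).length * (rbN * cbN + 6) ^ d
                ≤ rbN * cbN * (rbN * cbN + 6) ^ d :=
              Nat.mul_le_mul_right _ hL
            have hsplit : (rbN * cbN + 6) ^ (d + 1)
                = rbN * cbN * (rbN * cbN + 6) ^ d + 6 * (rbN * cbN + 6) ^ d := by
              rw [pow_succ]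
              ring
            rw [hsplit]
            omega
          · rw [show 1 + (f1 + (f2 + (f3 + (f4 + (1 + (fS + 1)))))) + g
                = (f1 + (f2 + (f3 + (f4 + (1 + (fS + (1 + g))))))) + 1 from by omega]
            rw [stackB_visit, if_neg hg1, if_neg hg2, if_pos h3]
            simp only [List.cons_append, List.nil_append]
            rw [he1, he2, he3, he4]
            rw [show 1 + (fS + (1 + g)) = (fS + (1 + g)) + 1 from by omega]
            rw [stackB_sewer]
            have hsew : sewerB s5.1 ((rbN : Int)).toNat ((cbN : Int)).toNat = sewer_check s5.1 := by
              rw [Int.toNat_natCast, Int.toNat_natCast]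
              exact sewer_eq s5.1 rbN cbN d5a d5b
            rw [hsew, heS]
            rw [show 1 + g = g + 1 from by omega, stackB_restore]
        · rw [if_neg h3] at h
          cases h
          obtain ⟨f4, hb4, he4⟩ := ihd _ _ _ _ _ hs5 rbN cbN d4a d4b g rest
          obtain ⟨f3, hb3, he3⟩ := ihd _ _ _ _ _ hs4 rbN cbN d3a d3b (f4 + g)
            (BFrame.visit r (c - 1) :: rest)
          obtain ⟨f2, hb2, he2⟩ := ihd _ _ _ _ _ hs3 rbN cbN d2a d2b (f3 + (f4 + g))
            (BFrame.visit (r + 1) c :: BFrame.visit r (c - 1) :: rest)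
          obtain ⟨f1, hb1, he1⟩ := ihd _ _ _ _ _ hs2 rbN cbN d1a d1b (f2 + (f3 + (f4 + g)))
            (BFrame.visit r (c + 1) :: BFrame.visit (r + 1) c :: BFrame.visit r (c - 1) :: rest)
          refine ⟨1 + (f1 + (f2 + (f3 + f4))), ?_, ?_⟩
          · have h6 : (rbN * cbN + 6) ^ d * 6 ≤ (rbN * cbN + 6) ^ d * (rbN * cbN + 6) :=
              Nat.mul_le_mul_left _ (by omega)
            rw [pow_succ]
            omega
          · rw [show 1 + (f1 + (f2 + (f3 + f4))) + g
                = (f1 + (f2 + (f3 + (f4 + g)))) + 1 from by omega]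
            rw [stackB_visit, if_neg hg1, if_neg hg2, if_neg h3]
            simp only [List.nil_append]
            rw [he1, he2, he3, he4]

theorem main_eq : ∀ (city : List (List String)) (row clmn eaten : Int),
    Pre_rec_blob city row clmn eaten →
    rec_blob city row clmn eaten = rec_blob_alt city row clmn eaten := by
  intro city row clmn eaten hpre
  obtain ⟨hne, hcase⟩ := hpre
  by_cases hg1 : (row < 0 ∨ (city.length : Int) ≤ row ∨ clmn < 0 ∨ ((city.headD []).length : Int) ≤ clmn)
  · -- start out of bounds: both immediately return eaten
    have hA : rec_blob city row clmn eaten = eaten := by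
      unfold rec_blob
      rw [show city.length * (city.headD []).length + 2 = (city.length * (city.headD []).length + 1) + 1 from rfl, recA_succ, if_pos hg1]
    have hB : rec_blob_alt city row clmn eaten = eaten := by
      simp only [rec_blob_alt]
      have h1 : 1 ≤ (city.length * (city.headD []).length + 6) ^ (city.length * (city.headD []).length + 2) := Nat.one_le_pow _ _ (by omega)
      obtain ⟨k, hk⟩ : ∃ k, (city.length * (city.headD []).length + 6) ^ (city.length * (city.headD []).length + 2) + 1 = (k + 1) + 1 :=
        ⟨(city.length * (city.headD []).length + 6) ^ (city.length * (city.headD []).length + 2) - 1, by omega⟩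
      rw [hk, stackB_visit, if_pos hg1, stackB_nil]
    rw [hA, hB]
  · by_cases hg2 : (cellGet city row clmn = "B" ∨ cellGet city row clmn = "#")
    · -- start blocked: both immediately return eaten
      have hA : rec_blob city row clmn eaten = eaten := by
        unfold rec_blob
        rw [show city.length * (city.headD []).length + 2 = (city.length * (city.headD []).length + 1) + 1 from rfl, recA_succ, if_neg hg1, if_pos hg2]
      have hB : rec_blob_alt city row clmn eaten = eaten := by
        simp only [rec_blob_alt]
        have h1 : 1 ≤ (city.length * (city.headD []).length + 6) ^ (city.length * (city.headD []).length + 2) := Nat.one_le_pow _ _ (by omega)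
        obtain ⟨k, hk⟩ : ∃ k, (city.length * (city.headD []).length + 6) ^ (city.length * (city.headD []).length + 2) + 1 = (k + 1) + 1 :=
          ⟨(city.length * (city.headD []).length + 6) ^ (city.length * (city.headD []).length + 2) - 1, by omega⟩
        rw [hk, stackB_visit, if_neg hg1, if_pos hg2, stackB_nil]
      rw [hA, hB]
    · -- start active: the grid must be well-shaped by Pre_
      have hshape : shapeOK city := by
        rcases hcase with h | h | h
        · exact h
        · exact absurd h (by tauto)
        · -- blocked start contradicts hg2
          exact absurd (Or.imp (fun x => x) (fun x => x) h.2.2.2.2.2) hg2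
      obtain ⟨s', hs'⟩ := recA_total (city.length * (city.headD []).length + 1) city row clmn eaten hshape
        (le_trans (Scnt_le_card city.length (city.headD []).length city) (by omega))
      have hA : rec_blob city row clmn eaten = s'.2 := by
        unfold rec_blob
        rw [show city.length * (city.headD []).length + 2 = (city.length * (city.headD []).length + 1) + 1 from rfl, hs']
      obtain ⟨f, hb, he⟩ := sim (city.length * (city.headD []).length + 1 + 1) city row clmn eaten s' hs' city.length (city.headD []).length rfl rfl 1 []
      rw [stackB_nil 0] at he
      have hmono := stackB_mono (f + 1) [BFrame.visit row clmn] city eaten (city.length : Int) ((city.headD []).length : Int)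
        s'.2 he ((city.length * (city.headD []).length + 6) ^ (city.length * (city.headD []).length + 2) + 1 - (f + 1))
      have harith : f + 1 + ((city.length * (city.headD []).length + 6) ^ (city.length * (city.headD []).length + 2) + 1 - (f + 1)) = (city.length * (city.headD []).length + 6) ^ (city.length * (city.headD []).length + 2) + 1 := by
        have : f ≤ (city.length * (city.headD []).length + 6) ^ (city.length * (city.headD []).length + 2) := by
          rw [show city.length * (city.headD []).length + 2 = city.length * (city.headD []).length + 1 + 1 from rfl]
          exact hb
        omega
      rw [harith] at hmono
      have hB : rec_blob_alt city row clmn eaten = s'.2 := by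
        simp only [rec_blob_alt]
        rw [hmono]
      rw [hA, hB]

-- ===== VERDICT (by name: the statement is the Claim_ definition above) =====
theorem rec_blob_spec : Claim_equal_rec_blob := by
  intro city row clmn eaten _ hpre
  unfold Spec_rec_blob
  exact main_eq city row clmn eaten hpre
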